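-- pv_equiv track=rewrite | github.com/osso73/pyscripts | scripts/clp.py | custom
-- ===== SOURCE A (Python) =====
-- def custom(original):
--     """
--     remove first characters of each line before '. '
--     """
--     lines = original.split("\n")
--     lines_out = list()
--     for line in lines:
--         pos = line.find(". ")
--         if pos == -1:
--             pos = -2
--         lines_out.append(line[pos + 2 :])
--
--     final = "\n".join(lines_out)
--     return final
-- ===== SOURCE B (Python) =====
-- def custom(original):
--     """
--     remove first characters of each line before '. '
--     """
--     out = []
--     buf = []            # pending chars of the current line, '. ' not seen yet
--     skipping = True     # still searching for '. ' in the current line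
--     for ch in original:
--         if ch == '\n':
--             if skipping:
--                 out += buf
--             out.append('\n')
--             buf = []
--             skipping = True
--         elif not skipping:
--             out.append(ch)
--         elif ch == ' ' and buf and buf[-1] == '.':
--             buf = []
--             skipping = False
--         else:
--             buf.append(ch)
--     if skipping:
--         out += buf
--     return ''.join(out)
-- ===== Notes on version B (the rewrite author's own statement) =====
-- stated objective: alternative
-- what changed: Replaced A's split-on-newline / per-line find('. ') / slice / join pipeline by a single character-by-character state-machine pass that buffers the current line's prefix until '. ' is seen and streams the rest.
import Mathlib
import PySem

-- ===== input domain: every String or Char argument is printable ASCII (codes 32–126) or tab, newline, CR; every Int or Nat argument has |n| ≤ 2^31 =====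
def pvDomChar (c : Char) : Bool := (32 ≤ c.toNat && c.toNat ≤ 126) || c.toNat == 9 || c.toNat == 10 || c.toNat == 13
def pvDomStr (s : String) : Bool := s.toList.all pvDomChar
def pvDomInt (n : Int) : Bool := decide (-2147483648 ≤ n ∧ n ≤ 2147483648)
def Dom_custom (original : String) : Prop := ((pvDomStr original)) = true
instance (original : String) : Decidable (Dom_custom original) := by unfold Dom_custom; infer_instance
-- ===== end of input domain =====

-- B replaces A's split / per-line find / join pipeline by a single character-by-character
-- state-machine pass over the string (objective: alternative).

-- ===== PORT A =====
-- A: split on '\n', per line find ". " (pos := -2 if absent), keep line[pos+2:], join back.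
def custom (original : String) : String :=
  let lines := PySem.Chars.splitOn original.toList ['\n']
  let linesOut := lines.foldl (fun acc line =>
    let pos := PySem.Chars.find line ['.', ' ']
    let pos2 := if pos = -1 then (-2 : Int) else pos
    acc ++ [PySem.Chars.slice line (some (pos2 + 2)) none]) []
  String.ofList (PySem.Chars.join ['\n'] linesOut)

-- ===== PORT B =====
-- B's loop: out = finalized output, buf = pending prefix of the current line while the
-- '. ' marker has not been seen yet, skipping = still searching for '. ' in this line.
def bGo : List Char → List Char → List Char → Bool → List Char
  | [], out, buf, skipping => if skipping then out ++ buf else out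
  | c :: rest, out, buf, skipping =>
    if c = '\n' then
      bGo rest ((if skipping then out ++ buf else out) ++ ['\n']) [] true
    else if skipping = false then
      bGo rest (out ++ [c]) buf skipping
    else if c = ' ' ∧ buf ≠ [] ∧ PySem.List.pyGet? buf (-1) = some '.' then
      bGo rest out [] false
    else
      bGo rest out (buf ++ [c]) skipping

def custom_alt (original : String) : String :=
  String.ofList (bGo original.toList [] [] true)

-- ===== PRECONDITION & SPEC =====
def Spec_custom (original : String) (out : String) : Prop := out = custom_alt original
instance (original : String) (out : String) : Decidable (Spec_custom original out) := by unfold Spec_custom; infer_instance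

-- ===== CLAIM (what is proved, stated in full; the proofs are below) =====
def Claim_equal_custom : Prop := ∀ (original : String), Dom_custom original → Spec_custom original (custom original)

-- ===== LEMMAS AND PROOFS =====

-- the search pattern '. '
def sub2 : List Char := ['.', ' ']

-- A's per-line transformation, named
def fLine (line : List Char) : List Char :=
  let pos := PySem.Chars.find line ['.', ' ']
  let pos2 := if pos = -1 then (-2 : Int) else pos
  PySem.Chars.slice line (some (pos2 + 2)) none

-- reference line splitter: splitLines pre s = the lines of pre ++ s (pre contains no '\n')
def splitLines (pre : List Char) : List Char → List (List Char)
  | [] => [pre]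
  | c :: rest => if c = '\n' then pre :: splitLines [] rest else splitLines (pre ++ [c]) rest

-- A's whole result on the open current line pre followed by the rest s
def J (pre s : List Char) : List Char :=
  PySem.Chars.join ['\n'] ((splitLines pre s).map fLine)

-- output of the rest of the input once the current line's marker has been passed
def Tail : List Char → List Char
  | [] => []
  | c :: r => if c = '\n' then '\n' :: J [] r else c :: Tail r

lemma splitLines_ne_nil : ∀ (s pre : List Char), splitLines pre s ≠ [] := by
  intro s
  induction s with
  | nil => intro pre; simp [splitLines]
  | cons c r ih =>
    intro pre
    by_cases hc : c = '\n' <;> simp [splitLines, hc, ih]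

lemma splitOn_go_eq : ∀ (fuel : Nat) (l cur : List Char) (acc : List (List Char)),
    l.length < fuel →
    PySem.Chars.splitOn.go ['\n'] fuel l cur acc = acc.reverse ++ splitLines cur.reverse l := by
  intro fuel
  induction fuel with
  | zero => intro l cur acc h; omega
  | succ n ih =>
    intro l cur acc h
    cases l with
    | nil => simp [PySem.Chars.splitOn.go, splitLines]
    | cons c rest =>
      by_cases hc : c = '\n'
      · subst hc
        simp only [PySem.Chars.splitOn.go, List.isPrefixOf, BEq.rfl, Bool.true_and,
          if_pos, List.length_cons, List.length_nil, List.drop_succ_cons,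
          List.drop_zero]
        rw [ih rest [] (cur.reverse :: acc) (by simpa using h)]
        simp [splitLines]
      · have hpre : ['\n'].isPrefixOf (c :: rest) = false := by
          simp [List.isPrefixOf]
          exact fun hh => absurd hh.symm hc
        simp only [PySem.Chars.splitOn.go, hpre, Bool.false_eq_true, if_neg, not_false_iff]
        rw [ih rest (c :: cur) acc (by simpa using h)]
        simp [splitLines, hc]

lemma splitOn_eq (s : List Char) : PySem.Chars.splitOn s ['\n'] = splitLines [] s := by
  unfold PySem.Chars.splitOn
  rw [splitOn_go_eq (s.length + 1) s [] [] (by omega)]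
  simp

lemma fLine_of_not_infix (buf : List Char) (h : ¬ sub2 <:+: buf) : fLine buf = buf := by
  have h1 : PySem.Chars.find buf sub2 = -1 := (PySem.Chars.find_eq_neg_one_iff buf sub2).2 h
  have h2 : PySem.Chars.find buf ['.', ' '] = -1 := h1
  simp [fLine, h2, show (-2 + 2 : Int) = 0 from by norm_num, PySem.Chars.slice,
    PySem.List.slice_zero_start, PySem.List.slice_none_none]

lemma fLine_found (q : List Char) (k : Nat) (_hk : k + 2 ≤ q.length)
    (hf : PySem.Chars.find q sub2 = (k : Int)) : fLine q = q.drop (k + 2) := by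
  have h2 : PySem.Chars.find q ['.', ' '] = (k : Int) := hf
  have hne : ¬ ((k : Int) = -1) := by omega
  simp only [fLine, h2, hne, if_neg, not_false_iff]
  have : (k : Int) + 2 = ((k + 2 : Nat) : Int) := by push_cast; ring
  rw [this]
  exact PySem.List.slice_from_natCast q (k + 2)

lemma find_eq_of (s : List Char) (k : Nat) (h1 : sub2 <+: s.drop k)
    (h2 : ∀ i < k, ¬ sub2 <+: s.drop i) : PySem.Chars.find s sub2 = (k : Int) := by
  have hinf : sub2 <:+: s := h1.isInfix.trans (List.drop_suffix k s).isInfix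
  have hnn : 0 ≤ PySem.Chars.find s sub2 := (PySem.Chars.find_nonneg_iff s sub2).2 hinf
  obtain ⟨hp, hmin⟩ := PySem.Chars.find_spec hnn
  have htn := Int.toNat_of_nonneg hnn
  rcases lt_trichotomy (PySem.Chars.find s sub2).toNat k with h | h | h
  · exact absurd hp (h2 _ h)
  · omega
  · exact absurd h1 (hmin k h)

lemma find_concat (q : List Char) (c : Char) (k : Nat) (hk : k + 2 ≤ q.length)
    (hf : PySem.Chars.find q sub2 = (k : Int)) :
    PySem.Chars.find (q ++ [c]) sub2 = (k : Int) := by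
  have hnn : 0 ≤ PySem.Chars.find q sub2 := by omega
  obtain ⟨hp, hmin⟩ := PySem.Chars.find_spec hnn
  have htn : (PySem.Chars.find q sub2).toNat = k := by omega
  rw [htn] at hp hmin
  apply find_eq_of
  · rw [List.drop_append_of_le_length (by omega)]
    exact hp.trans (List.prefix_append _ _)
  · intro i hi hcontra
    rw [List.drop_append_of_le_length (by omega)] at hcontra
    have hlen : sub2.length ≤ (q.drop i).length := by
      simp [sub2]; omega
    exact hmin i hi ((List.isPrefix_append_of_length hlen).mp hcontra)

lemma find_detect (b : List Char) (hni : ¬ sub2 <:+: (b ++ ['.'])) :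
    PySem.Chars.find (b ++ ['.', ' ']) sub2 = (b.length : Int) := by
  apply find_eq_of
  · rw [List.drop_left]; simp [sub2]
  · intro i hi hc
    rw [show b ++ ['.', ' '] = (b ++ ['.']) ++ [' '] from by simp] at hc
    rw [List.drop_append_of_le_length (by simp; omega)] at hc
    have hlen : sub2.length ≤ ((b ++ ['.']).drop i).length := by
      simp [sub2]; omega
    have hpre := (List.isPrefix_append_of_length hlen).mp hc
    exact hni (hpre.isInfix.trans (List.drop_suffix _ _).isInfix)

lemma infix_concat_cases {buf : List Char} {c : Char} (h : sub2 <:+: buf ++ [c]) :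
    sub2 <:+: buf ∨ (c = ' ' ∧ buf.getLast? = some '.') := by
  obtain ⟨u, v, huv⟩ := h
  rcases List.eq_nil_or_concat v with rfl | ⟨vs, d, rfl⟩
  · right
    have he : (u ++ ['.']) ++ [' '] = buf ++ [c] := by simpa [sub2] using huv
    obtain ⟨h1, h2⟩ := List.append_singleton_inj.mp he
    exact ⟨h2.symm, by rw [← h1]; exact List.getLast?_concat⟩
  · left
    have he : (u ++ sub2 ++ vs) ++ [d] = buf ++ [c] := by simpa using huv
    obtain ⟨h1, _⟩ := List.append_singleton_inj.mp he
    exact ⟨u, vs, h1⟩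

lemma J_nil (pre : List Char) : J pre [] = fLine pre := by
  simp [J, splitLines, PySem.Chars.join_singleton]

lemma J_newline (pre r : List Char) : J pre ('\n' :: r) = fLine pre ++ '\n' :: J [] r := by
  obtain ⟨a, as, hsl⟩ := List.exists_cons_of_ne_nil (splitLines_ne_nil r [])
  simp [J, splitLines, hsl, PySem.Chars.join_cons_cons]

lemma J_cons (pre : List Char) (c : Char) (r : List Char) (h : c ≠ '\n') :
    J pre (c :: r) = J (pre ++ [c]) r := by
  simp [J, splitLines, h]

lemma J_found : ∀ (s q : List Char) (k : Nat), k + 2 ≤ q.length →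
    PySem.Chars.find q sub2 = (k : Int) → J q s = q.drop (k + 2) ++ Tail s := by
  intro s
  induction s with
  | nil =>
    intro q k hk hf
    rw [J_nil, fLine_found q k hk hf]
    simp [Tail]
  | cons c r ih =>
    intro q k hk hf
    by_cases hc : c = '\n'
    · subst hc
      rw [J_newline, fLine_found q k hk hf]
      simp [Tail]
    · rw [J_cons _ _ _ hc, ih (q ++ [c]) k (by simp; omega) (find_concat q c k hk hf),
        List.drop_append_of_le_length (by omega)]
      simp [Tail, hc]

lemma bGo_spec : ∀ s : List Char,
    (∀ out buf, ¬ sub2 <:+: buf → bGo s out buf true = out ++ J buf s) ∧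
    (∀ out buf', bGo s out buf' false = out ++ Tail s) := by
  intro s
  induction s with
  | nil =>
    constructor
    · intro out buf h
      rw [bGo, J_nil, fLine_of_not_infix buf h]
      simp
    · intro out buf'
      simp [bGo, Tail]
  | cons c r ih =>
    obtain ⟨ih1, ih2⟩ := ih
    constructor
    · intro out buf h
      by_cases hc : c = '\n'
      · subst hc
        rw [bGo, if_pos rfl]
        rw [ih1 _ [] (by simp [sub2])]
        rw [J_newline, fLine_of_not_infix buf h]
        simp
      · by_cases hd : c = ' ' ∧ buf ≠ [] ∧ PySem.List.pyGet? buf (-1) = some '.'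
        · rw [bGo, if_neg hc, if_neg (by simp), if_pos hd]
          rw [ih2 out []]
          obtain ⟨hsp, hne, hlast⟩ := hd
          rw [PySem.List.pyGet?_neg_one] at hlast
          obtain ⟨b, rfl⟩ := List.getLast?_eq_some_iff.mp hlast
          subst hsp
          rw [J_cons _ _ _ hc]
          have hfind : PySem.Chars.find ((b ++ ['.']) ++ [' ']) sub2 = (b.length : Int) := by
            simpa using find_detect b h
          rw [J_found r ((b ++ ['.']) ++ [' ']) b.length (by simp) hfind]
          simp
        · rw [bGo, if_neg hc, if_neg (by simp), if_neg hd]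
          rw [ih1 out (buf ++ [c]) ?_, J_cons _ _ _ hc]
          intro hinf
          rcases infix_concat_cases hinf with hin | ⟨hsp, hlast⟩
          · exact h hin
          · apply hd
            refine ⟨hsp, ?_, ?_⟩
            · intro hnil; rw [hnil] at hlast; simp at hlast
            · rw [PySem.List.pyGet?_neg_one]; exact hlast
    · intro out buf'
      by_cases hc : c = '\n'
      · subst hc
        rw [bGo, if_pos rfl]
        rw [ih1 _ [] (by simp [sub2])]
        simp [Tail]
      · rw [bGo, if_neg hc, if_pos rfl]
        rw [ih2 (out ++ [c]) buf']
        simp [Tail, hc]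

-- ===== VERDICT (by name: the statement is the Claim_ definition above) =====
theorem custom_spec : Claim_equal_custom := by
  intro original _
  show custom original = custom_alt original
  have h1 : custom original = String.ofList (J [] original.toList) := by
    unfold custom
    rw [splitOn_eq]
    show String.ofList (PySem.Chars.join ['\n']
      (List.foldl (fun acc line => acc ++ [fLine line]) [] (splitLines [] original.toList))) = _
    rw [PySem.List.foldl_append_singleton_eq_map fLine]
    simp [J]
  have h2 : custom_alt original = String.ofList (J [] original.toList) := by
    unfold custom_alt
    rw [(bGo_spec original.toList).1 [] [] (by simp [sub2])]
    simp
  rw [h1, h2]
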